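-- pv_equiv track=rewrite | github.com/kenna26/morseCode | audioMorse/morseCode.py | translateBoth
-- ===== SOURCE A (Python) =====
-- morseCode = {"A" : ".-", "B": "-...", "C": "-.-.","D":"-..", "E":".",
-- "F":"..-.","G":"--.", "H":"....","I":"..","J":".---","K":"-.-","L":".-..",
-- "M":"--", "N":"-.","O":"---", "P":".--.","Q":"--.-","R":".-.","S":"...",
-- "T":"-","U":"..-","V":"...-","W":".--","X":"-..-","Y":"-.--","Z":"--..", " ":"/"}
--
-- def isLetters(text):
--      for element in "qwertyuiopasdfghjklzxcvbnm":
--         if (element in text):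
--             return True
--
-- def translateBoth(text):
--     morse = False
--     final = ""
--     if isLetters(text): #input is english
--         first = True
--         for letter in text:
--             if not first:
--                 final += " "
--             first = False
--
--             if letter == " ":
--                 final += "/"
--             else:
--                 final += morseCode[letter.upper()]
--
--
--     else: #input is morse code
--         split = text.split(" ")
--         for morseLetter in split:
--             if morseLetter == "/":
--                 final += " "
--             else:
--                 for letter in morseCode:
--                     if morseCode[letter] == morseLetter:
--                         final += letter
--     return final
-- ===== SOURCE B (Python) =====
-- morseCode = {"A" : ".-", "B": "-...", "C": "-.-.","D":"-..", "E":".",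
-- "F":"..-.","G":"--.", "H":"....","I":"..","J":".---","K":"-.-","L":".-..",
-- "M":"--", "N":"-.","O":"---", "P":".--.","Q":"--.-","R":".-.","S":"...",
-- "T":"-","U":"..-","V":"...-","W":".--","X":"-..-","Y":"-.--","Z":"--..", " ":"/"}
--
-- # the classic Morse binary tree: (letter-or-None, dot-subtree, dash-subtree)
-- _TREE = (None,
--          ('E', ('I', ('S', ('H', None, None), ('V', None, None)),
--                      ('U', ('F', None, None), None)),
--                ('A', ('R', ('L', None, None), None),
--                      ('W', ('P', None, None), ('J', None, None)))),
--          ('T', ('N', ('D', ('B', None, None), ('X', None, None)),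
--                      ('K', ('C', None, None), ('Y', None, None))),
--                ('M', ('G', ('Z', None, None), ('Q', None, None)),
--                      ('O', None, None))))
--
-- def _decode(token):
--     node = _TREE
--     for ch in token:
--         if node is None:
--             return ''
--         node = node[1] if ch == '.' else node[2] if ch == '-' else None
--     if node is None or node[0] is None:
--         return ''
--     return node[0]
--
-- def translateBoth(text):
--     if any(c in "qwertyuiopasdfghjklzxcvbnm" for c in text):  # english
--         return ' '.join('/' if c == ' ' else morseCode[c.upper()] for c in text)
--     # morse: decode each token by walking the dot/dash tree; unknown tokens vanish
--     return ''.join(' ' if t == '/' else _decode(t) for t in text.split(' '))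
-- ===== Notes on version B (the rewrite author's own statement) =====
-- stated objective: alternative
-- what changed: B decodes Morse tokens by walking the classic dot/dash binary tree (each token is a root-to-node path) instead of A's inner scan over the whole dictionary per token, and builds the English output as a join over a per-character map instead of A's first-flag accumulator loop.
import Mathlib
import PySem

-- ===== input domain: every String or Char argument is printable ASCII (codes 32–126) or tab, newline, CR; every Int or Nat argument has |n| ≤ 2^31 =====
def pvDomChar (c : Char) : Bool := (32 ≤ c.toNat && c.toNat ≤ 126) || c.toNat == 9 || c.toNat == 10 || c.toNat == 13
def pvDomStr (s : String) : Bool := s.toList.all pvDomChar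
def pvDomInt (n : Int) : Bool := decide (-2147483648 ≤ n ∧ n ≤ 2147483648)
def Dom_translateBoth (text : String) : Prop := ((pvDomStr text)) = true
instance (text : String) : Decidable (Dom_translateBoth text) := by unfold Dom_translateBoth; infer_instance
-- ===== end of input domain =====

-- B decodes Morse by walking the classic dot/dash binary tree instead of A's per-token scan
-- over the whole dictionary, and joins a per-character map for the English branch (alternative).

-- shared module constant morseCode, as an association list of (letter, code), both as List Char
def pvMorseItems : List (List Char × List Char) := [
  ("A".toList, ".-".toList),
  ("B".toList, "-...".toList),
  ("C".toList, "-.-.".toList),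
  ("D".toList, "-..".toList),
  ("E".toList, ".".toList),
  ("F".toList, "..-.".toList),
  ("G".toList, "--.".toList),
  ("H".toList, "....".toList),
  ("I".toList, "..".toList),
  ("J".toList, ".---".toList),
  ("K".toList, "-.-".toList),
  ("L".toList, ".-..".toList),
  ("M".toList, "--".toList),
  ("N".toList, "-.".toList),
  ("O".toList, "---".toList),
  ("P".toList, ".--.".toList),
  ("Q".toList, "--.-".toList),
  ("R".toList, ".-.".toList),
  ("S".toList, "...".toList),
  ("T".toList, "-".toList),
  ("U".toList, "..-".toList),
  ("V".toList, "...-".toList),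
  ("W".toList, ".--".toList),
  ("X".toList, "-..-".toList),
  ("Y".toList, "-.--".toList),
  ("Z".toList, "--..".toList),
  (" ".toList, "/".toList)]

def pvAlphabet : List Char := "qwertyuiopasdfghjklzxcvbnm".toList

-- ===== PORT A =====
-- morseCode[k]: first value whose key matches; [] stands for Python's KeyError, excluded by Pre_
def pvLookupVal : List (List Char × List Char) → List Char → List Char
  | [], _ => []
  | p :: rest, k => if p.1 = k then p.2 else pvLookupVal rest k

-- isLetters: loop over the alphabet, return True on the first letter contained in text
def pvIsLettersA (cs : List Char) : Bool := pvAlphabet.any (fun e => PySem.Chars.isIn [e] cs)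

-- the English-branch loop body: state (first, final)
def pvStepA (st : Bool × List Char) (letter : Char) : Bool × List Char :=
  let final := if st.1 then st.2 else st.2 ++ [' ']
  (false, if letter = ' ' then final ++ ['/']
          else final ++ pvLookupVal pvMorseItems [PySem.Chars.upperChar letter])

def pvEnglishA (cs : List Char) : List Char := (cs.foldl pvStepA (true, [])).2

-- the Morse branch: for each token, '/' → ' ', else inner scan over the whole dictionary
def pvMorseA (cs : List Char) : List Char :=
  (PySem.Chars.splitOn cs [' ']).foldl
    (fun final t =>
      if t = "/".toList then final ++ [' ']
      else pvMorseItems.foldl (fun f p => if p.2 = t then f ++ p.1 else f) final) []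

def translateBoth (text : String) : String :=
  String.ofList (if pvIsLettersA text.toList then pvEnglishA text.toList else pvMorseA text.toList)

-- ===== PORT B =====
-- the classic Morse binary tree: letter (if any), dot subtree, dash subtree; leaf = Python None
inductive PVTree : Type
  | leaf : PVTree
  | node : Option Char → PVTree → PVTree → PVTree
deriving DecidableEq, Repr

def pvTree : PVTree :=
  .node none
    (.node (some 'E')
      (.node (some 'I')
        (.node (some 'S') (.node (some 'H') .leaf .leaf) (.node (some 'V') .leaf .leaf))
        (.node (some 'U') (.node (some 'F') .leaf .leaf) .leaf))
      (.node (some 'A')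
        (.node (some 'R') (.node (some 'L') .leaf .leaf) .leaf)
        (.node (some 'W') (.node (some 'P') .leaf .leaf) (.node (some 'J') .leaf .leaf))))
    (.node (some 'T')
      (.node (some 'N')
        (.node (some 'D') (.node (some 'B') .leaf .leaf) (.node (some 'X') .leaf .leaf))
        (.node (some 'K') (.node (some 'C') .leaf .leaf) (.node (some 'Y') .leaf .leaf)))
      (.node (some 'M')
        (.node (some 'G') (.node (some 'Z') .leaf .leaf) (.node (some 'Q') .leaf .leaf))
        (.node (some 'O') .leaf .leaf)))

-- _decode's loop: descend by '.'/'-', any other char or a missing subtree kills the walk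
def pvWalk : PVTree → List Char → Option Char
  | .leaf, _ => none
  | .node l _ _, [] => l
  | .node _ d s, c :: r => if c = '.' then pvWalk d r else if c = '-' then pvWalk s r else none

def pvDec (t : List Char) : List Char := (pvWalk pvTree t).elim [] (fun c => [c])

-- any(c in alphabet for c in text)
def pvIsLettersB (cs : List Char) : Bool := cs.any (fun c => PySem.Chars.isIn [c] pvAlphabet)

-- '/' if c == ' ' else morseCode[c.upper()]  ([] stands for KeyError, excluded by Pre_)
def pvEnc (c : Char) : List Char :=
  if c = ' ' then "/".toList
  else ((PySem.Dict.mk pvMorseItems).get? [PySem.Chars.upperChar c]).getD []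

def pvEnglishB (cs : List Char) : List Char := PySem.Chars.join [' '] (cs.map pvEnc)

-- ''.join(' ' if t == '/' else _decode(t) for t in text.split(' '))
def pvMorseB (cs : List Char) : List Char :=
  PySem.Chars.join []
    ((PySem.Chars.splitOn cs [' ']).map (fun t => if t = "/".toList then [' '] else pvDec t))

def translateBoth_alt (text : String) : String :=
  String.ofList (if pvIsLettersB text.toList then pvEnglishB text.toList else pvMorseB text.toList)

-- ===== PRECONDITION & SPEC =====
-- Pre_ excludes exactly the inputs on which A raises KeyError: texts that contain a lowercase
-- letter (English branch) together with some character that is neither an ASCII letter nor a space.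
def Pre_translateBoth (text : String) : Prop :=
  text.toList.any (fun c => decide ('a' ≤ c) && decide (c ≤ 'z')) = true →
    text.toList.all (fun c =>
      (decide ('a' ≤ c) && decide (c ≤ 'z')) || (decide ('A' ≤ c) && decide (c ≤ 'Z')) || c == ' ') = true
instance (text : String) : Decidable (Pre_translateBoth text) := by
  unfold Pre_translateBoth; infer_instance

def pvWitness_translateBoth : String := "ab"

def Spec_translateBoth (text : String) (out : String) : Prop := out = translateBoth_alt text
instance (text : String) (out : String) : Decidable (Spec_translateBoth text out) := by
  unfold Spec_translateBoth; infer_instance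

-- ===== CLAIM (what is proved, stated in full; the proofs are below) =====
def Claim_equal_translateBoth : Prop :=
  ∀ (text : String), Dom_translateBoth text → Pre_translateBoth text →
    Spec_translateBoth text (translateBoth text)

-- ===== LEMMAS AND PROOFS =====

-- a one-character substring test is membership
theorem pv_isIn_singleton (e : Char) (cs : List Char) :
    PySem.Chars.isIn [e] cs = cs.contains e := by
  rw [Bool.eq_iff_iff, PySem.Chars.isIn_iff_infix]
  constructor
  · intro h
    simpa using List.singleton_sublist.mp h.sublist
  · intro h
    simp only [List.contains_eq_mem, decide_eq_true_eq] at h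
    rcases List.append_of_mem h with ⟨s, t, rfl⟩
    exact ⟨s, t, by simp⟩

-- the two letter tests agree (scanning the alphabet over the text vs the text over the alphabet)
theorem pv_isLetters_eq (cs : List Char) : pvIsLettersA cs = pvIsLettersB cs := by
  unfold pvIsLettersA pvIsLettersB
  simp only [pv_isIn_singleton]
  rw [Bool.eq_iff_iff]
  simp only [List.any_eq_true, List.contains_eq_mem, decide_eq_true_eq]
  constructor <;> rintro ⟨x, h1, h2⟩ <;> exact ⟨x, h2, h1⟩

-- A's hand lookup is B's dict lookup with default []
theorem pv_lookup_eq (items : List (List Char × List Char)) (k : List Char) :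
    pvLookupVal items k = ((PySem.Dict.mk items).get? k).getD [] := by
  induction items with
  | nil => rfl
  | cons p rest ih =>
      rw [pvLookupVal, PySem.Dict.get?_mk_cons]
      by_cases h : p.1 = k <;> simp [h, ih]

-- one step of A's English loop, once first = False
theorem pv_stepA_false (acc : List Char) (c : Char) :
    pvStepA (false, acc) c = (false, acc ++ (' ' :: pvEnc c)) := by
  unfold pvStepA pvEnc
  by_cases h : c = ' ' <;> simp [h, pv_lookup_eq]

-- A's English loop after the first character
theorem pv_englishA_false (cs : List Char) (acc : List Char) :
    (cs.foldl pvStepA (false, acc)).2 = acc ++ cs.flatMap (fun c => ' ' :: pvEnc c) := by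
  induction cs generalizing acc with
  | nil => simp
  | cons c rest ih =>
      rw [List.foldl_cons, pv_stepA_false, ih]
      simp

theorem pv_join_sep (x : List Char) (l : List (List Char)) :
    PySem.Chars.join [' '] (x :: l) = x ++ l.flatMap (fun y => ' ' :: y) := by
  induction l generalizing x with
  | nil => simp [PySem.Chars.join, List.intercalate]
  | cons y rest ih =>
      rw [PySem.Chars.join_cons_cons, ih]
      simp

-- the English branches agree
theorem pv_english_eq (cs : List Char) : pvEnglishA cs = pvEnglishB cs := by
  cases cs with
  | nil => rfl
  | cons c rest =>
      have h1 : pvStepA (true, []) c = (false, pvEnc c) := by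
        unfold pvStepA pvEnc
        by_cases h : c = ' ' <;> simp [h, pv_lookup_eq]
      show (List.foldl pvStepA (pvStepA (true, []) c) rest).2 = _
      rw [h1, pv_englishA_false, pvEnglishB, List.map_cons, pv_join_sep]
      simp [List.flatMap_map]

-- join with empty separator is flatten
theorem pv_join_nil_eq (l : List (List Char)) : PySem.Chars.join [] l = l.flatten := by
  induction l with
  | nil => rfl
  | cons x rest ih =>
      cases rest with
      | nil => simp [PySem.Chars.join, List.intercalate]
      | cons y r => rw [PySem.Chars.join_cons_cons, ih]; simp

-- the concatenation of all matching keys, when the codes are distinct, is the first match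
theorem pv_flat_find (items : List (List Char × List Char)) (t : List Char)
    (h : (items.map Prod.snd).Nodup) :
    items.flatMap (fun p => if p.2 = t then p.1 else []) =
      ((items.find? (fun p => p.2 == t)).map Prod.fst).getD [] := by
  induction items with
  | nil => rfl
  | cons p rest ih =>
      rw [List.map_cons, List.nodup_cons] at h
      rw [List.flatMap_cons, List.find?_cons]
      by_cases hp : p.2 = t
      · have hnil : rest.flatMap (fun q => if q.2 = t then q.1 else []) = [] := by
          apply List.flatMap_eq_nil_iff.mpr
          intro q hq
          have hne : q.2 ≠ t := fun he =>
            h.1 (by rw [hp, ← he]; exact List.mem_map_of_mem hq)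
          simp [hne]
        simp [hp, hnil]
      · have hb : (p.2 == t) = false := by simp [hp]
        simp [hp, hb, ih h.2]

-- all (code, letter) pairs read off the tree, codes being the root-to-node paths
def pvPaths : PVTree → List (List Char × Char)
  | .leaf => []
  | .node l d s =>
      (match l with | some c => [([], c)] | none => []) ++
      ((pvPaths d).map (fun p => ('.' :: p.1, p.2)) ++
       (pvPaths s).map (fun p => ('-' :: p.1, p.2)))

-- the tree walk finds exactly the entry of pvPaths whose code is the token
theorem pv_walk_eq_find (tr : PVTree) (t : List Char) :
    pvWalk tr t = ((pvPaths tr).find? (fun p => p.1 == t)).map Prod.snd := by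
  induction tr generalizing t with
  | leaf => simp [pvWalk, pvPaths]
  | node l d s ihd ihs =>
      cases t with
      | nil =>
          cases l with
          | none => simp [pvWalk, pvPaths, List.find?_append, List.find?_map, Function.comp]
          | some c => simp [pvWalk, pvPaths]
      | cons c r =>
          have hhead : (match l with | some c => [([], c)] | none => []).find?
              (fun (p : List Char × Char) => p.1 == c :: r) = none := by
            cases l <;> simp
          simp only [pvWalk, pvPaths]
          rw [List.find?_append, hhead, Option.none_or, List.find?_append,
              List.find?_map, List.find?_map]
          by_cases h1 : c = '.'
          · have hdash : (pvPaths s).find? ((fun p => p.1 == c :: r) ∘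
                (fun p => ('-' :: p.1, p.2))) = none := by
              apply List.find?_eq_none.mpr
              intro x _
              simp [Function.comp, h1]
            rw [if_pos h1, hdash, ihd r]
            subst h1
            simp [Function.comp]
            congr 1
          · by_cases h2 : c = '-'
            · have hdot : (pvPaths d).find? ((fun p => p.1 == c :: r) ∘
                  (fun p => ('.' :: p.1, p.2))) = none := by
                apply List.find?_eq_none.mpr
                intro x _
                simp only [Function.comp, beq_iff_eq, List.cons.injEq, not_and]
                exact fun h => absurd h.symm h1
              rw [if_neg h1, if_pos h2, hdot, ihs r]
              subst h2
              simp [Function.comp]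
              congr 1
            · have hdot : (pvPaths d).find? ((fun p => p.1 == c :: r) ∘
                  (fun p => ('.' :: p.1, p.2))) = none := by
                apply List.find?_eq_none.mpr
                intro x _
                simp only [Function.comp, beq_iff_eq, List.cons.injEq, not_and]
                exact fun h => absurd h.symm h1
              have hdash : (pvPaths s).find? ((fun p => p.1 == c :: r) ∘
                  (fun p => ('-' :: p.1, p.2))) = none := by
                apply List.find?_eq_none.mpr
                intro x _
                simp only [Function.comp, beq_iff_eq, List.cons.injEq, not_and]
                exact fun h => absurd h.symm h2
              rw [if_neg h1, if_neg h2, hdot, hdash]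
              simp

-- with distinct keys, a key-based find? returns the unique matching entry
theorem pv_find_of_mem (l : List (List Char × Char)) (x : List Char × Char) (t : List Char)
    (hn : (l.map Prod.fst).Nodup) (hm : x ∈ l) (hk : x.1 = t) :
    l.find? (fun p => p.1 == t) = some x := by
  induction l with
  | nil => cases hm
  | cons q rest ih =>
      rw [List.map_cons, List.nodup_cons] at hn
      rw [List.find?_cons]
      rcases List.mem_cons.mp hm with rfl | hm'
      · simp [hk]
      · have hq : (q.1 == t) = false := by
          simp only [beq_eq_false_iff_ne]
          intro he
          exact hn.1 (by rw [he, ← hk]; exact List.mem_map_of_mem hm')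
        rw [hq]
        exact ih hn.2 hm'
      
-- key-based find? is invariant under permutation when the keys are distinct
theorem pv_find_perm (l1 l2 : List (List Char × Char)) (hp : l1.Perm l2)
    (hn : (l1.map Prod.fst).Nodup) (t : List Char) :
    l1.find? (fun p => p.1 == t) = l2.find? (fun p => p.1 == t) := by
  cases h1 : l1.find? (fun p => p.1 == t) with
  | none =>
      symm
      apply List.find?_eq_none.mpr
      intro x hx
      exact List.find?_eq_none.mp h1 x (hp.mem_iff.mpr hx)
  | some x =>
      have hm : x ∈ l1 := List.mem_of_find?_eq_some h1
      have hk := List.find?_some h1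
      symm
      exact pv_find_of_mem l2 x t ((hp.map Prod.fst).nodup_iff.mp hn) (hp.mem_iff.mp hm)
        (by simpa using hk)

-- the swapped Morse items, letters as single characters (the '/' entry dropped)
def pvSwapped : List (List Char × Char) :=
  (pvMorseItems.dropLast).map (fun p => (p.2, p.1.headI))

-- the dictionary's first match (by code) is what the tree walk finds, for non-'/' tokens
theorem pv_items_find_eq_walk (t : List Char) (hs : t ≠ "/".toList) :
    (pvMorseItems.find? (fun p => p.2 == t)).map Prod.fst =
      (pvWalk pvTree t).map (fun c => [c]) := by
  have hsplit : pvMorseItems = pvMorseItems.dropLast ++ [(" ".toList, "/".toList)] := by decide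
  have hb : ¬ ((['/'] : List Char) = t) := fun h => hs h.symm
  rw [pv_walk_eq_find]
  have hperm : (pvPaths pvTree).Perm pvSwapped := by decide
  have hnod : ((pvPaths pvTree).map Prod.fst).Nodup := by decide
  rw [pv_find_perm _ _ hperm hnod t]
  rw [hsplit, List.find?_append]
  have h2 : ([((" ".toList : List Char), ("/".toList : List Char))].find?
      (fun p => p.2 == t)) = none := by simp [hb]
  rw [h2, Option.or_none]
  unfold pvSwapped
  rw [List.find?_map]
  have hpred : ((fun (p : List Char × Char) => p.1 == t) ∘
      (fun (p : List Char × List Char) => (p.2, p.1.headI))) =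
      (fun (p : List Char × List Char) => p.2 == t) := by
    funext p; rfl
  rw [hpred]
  cases hf : (pvMorseItems.dropLast).find? (fun p => p.2 == t) with
  | none => simp
  | some p =>
      have hm : p ∈ pvMorseItems.dropLast := List.mem_of_find?_eq_some hf
      have hall : ∀ q ∈ pvMorseItems.dropLast, q.1 = [q.1.headI] := by decide
      simp only [Option.map_some]
      conv_lhs => rw [hall p hm]

-- per-token agreement of the two Morse branches
theorem pv_token_eq (t : List Char) :
    (if t = "/".toList then [' ']
     else pvMorseItems.flatMap (fun p => if p.2 = t then p.1 else [])) =
    (if t = "/".toList then [' '] else pvDec t) := by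
  by_cases hs : t = "/".toList
  · simp [hs]
  · rw [if_neg hs, if_neg hs, pv_flat_find _ _ (by decide), pvDec,
        pv_items_find_eq_walk t hs]
    cases pvWalk pvTree t <;> simp

-- the Morse branches agree
theorem pv_morse_eq (cs : List Char) : pvMorseA cs = pvMorseB cs := by
  unfold pvMorseA pvMorseB
  rw [pv_join_nil_eq, List.flatten_eq_flatMap, List.flatMap_map]
  have hstep : ∀ (acc : List Char) (t : List Char), t ∈ PySem.Chars.splitOn cs [' '] →
      (fun final t => if t = "/".toList then final ++ [' ']
        else pvMorseItems.foldl (fun f p => if p.2 = t then f ++ p.1 else f) final) acc t =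
      acc ++ (if t = "/".toList then [' ']
              else pvMorseItems.flatMap (fun p => if p.2 = t then p.1 else [])) := by
    intro acc t _
    show (if t = "/".toList then acc ++ [' ']
          else pvMorseItems.foldl (fun f p => if p.2 = t then f ++ p.1 else f) acc) = _
    by_cases h : t = "/".toList
    · simp [h]
    · rw [if_neg h]
      have hfun : (fun (f : List Char) (p : List Char × List Char) =>
          if p.2 = t then f ++ p.1 else f) = (fun f p => f ++ (if p.2 = t then p.1 else [])) := by
        funext f p; by_cases hp : p.2 = t <;> simp [hp]
      rw [if_neg h, hfun, PySem.List.foldl_append_eq_flatMap]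
  have hA := PySem.List.foldl_congr_mem (PySem.Chars.splitOn cs [' ']) _
      (fun final t => final ++
        (if t = "/".toList then [' ']
         else pvMorseItems.flatMap (fun p => if p.2 = t then p.1 else []))) [] hstep
  rw [hA, PySem.List.foldl_append_eq_flatMap, List.nil_append]
  exact List.flatMap_congr (fun t _ => pv_token_eq t)

-- ===== VERDICT (by name: the statement is the Claim_ definition above) =====
theorem translateBoth_spec : Claim_equal_translateBoth := by
  intro text _ _
  unfold Spec_translateBoth translateBoth translateBoth_alt
  rw [pv_isLetters_eq, pv_english_eq, pv_morse_eq]
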